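-- pv_equiv track=rewrite | github.com/Olivera2708/Codeforces | #903/treci.py | brojanje
-- ===== SOURCE A (Python) =====
-- def slova(n):
--     minus = 1
--     ukupno = 0
--     while True:
--         if (n - minus > 0):
--             ukupno += n - minus
--             minus += 2
--         else:
--             return ukupno
--
-- def brojanje(matrica, n):
--     counter = 0
--     sloj = 1
--     i = 0
--     j = 0
--     for b in range(slova(n)):
--         lista = [matrica[i][j], matrica[j][n-1-i], matrica[n-i-1][n-j-1], matrica[n-j-1][i]]
--         najvece = max(lista)
--         for t in range(4):
--             counter += ord(najvece) - ord(lista[t])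
--
--         if (j < n-sloj-1):
--             j += 1
--         else:
--             j = sloj
--             i = sloj
--             sloj += 1
--
--     return counter
-- ===== SOURCE B (Python) =====
-- def brojanje(matrica, n):
--     counter = 0
--     for i in range(n):
--         for j in range(n):
--             here = ord(matrica[i][j])
--             best = max(here, ord(matrica[j][n - 1 - i]),
--                        ord(matrica[n - 1 - i][n - 1 - j]),
--                        ord(matrica[n - 1 - j][i]))
--             counter += best - here
--     return counter
-- ===== Notes on version B (the rewrite author's own statement) =====
-- stated objective: simpler
-- what changed: A walks only one representative cell per 4-element rotation orbit with a slova()-counted mutable state machine (sloj/i/j) and adds four differences per step; B is a plain double loop over every cell (i,j) in range(n) x range(n) that adds max(orbit ords) - ord(cell) once per cell, dropping the slova helper and the state machine entirely.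
-- outside the precondition, e.g. on brojanje([['b', 'a', 'a'], ['a', 'zz', 'a'], ['a', 'a', 'a']], 3): A returns 3, B raises TypeError; on brojanje([['ab']], 1): A returns 0, B raises TypeError
import Mathlib
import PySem

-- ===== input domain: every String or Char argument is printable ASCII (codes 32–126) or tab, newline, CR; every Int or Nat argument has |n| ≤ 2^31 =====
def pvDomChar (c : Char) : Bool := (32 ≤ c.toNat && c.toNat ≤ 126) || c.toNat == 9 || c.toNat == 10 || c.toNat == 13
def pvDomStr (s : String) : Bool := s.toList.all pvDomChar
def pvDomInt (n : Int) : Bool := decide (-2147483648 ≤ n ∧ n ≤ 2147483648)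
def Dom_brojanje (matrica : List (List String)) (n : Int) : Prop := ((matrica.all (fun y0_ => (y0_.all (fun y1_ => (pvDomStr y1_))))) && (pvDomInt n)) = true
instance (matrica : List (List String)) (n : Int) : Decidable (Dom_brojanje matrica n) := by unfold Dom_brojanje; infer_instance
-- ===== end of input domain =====

-- B replaces A's slova-counted state-machine walk over orbit representatives by a plain
-- double loop over all n×n cells, adding (orbit max − cell) once per cell (objective: simpler).

-- ===== PORT A =====
-- ord(s): exact for single-character strings; on any other string Python raises TypeError
-- (excluded by Pre_brojanje), where the port returns 0.
def pyOrdD (s : String) : Int :=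
  match s.toList with
  | [c] => (c.toNat : Int)
  | _ => 0

-- matrica[i][j]: PySem.List.pyGet? is exact; an out-of-range index raises IndexError
-- (excluded by Pre_brojanje), where the port returns "".
def cellD (matrica : List (List String)) (i j : Int) : String :=
  (PySem.List.pyGet? ((PySem.List.pyGet? matrica i).getD []) j).getD ""

-- the while-loop of slova, state (minus, ukupno)
def slovaGo (n minus ukupno : Int) : Int :=
  if n - minus > 0 then slovaGo n (minus + 2) (ukupno + (n - minus)) else ukupno
termination_by (n - minus).toNat
decreasing_by omega

def slova (n : Int) : Int := slovaGo n 1 0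

-- the `for b in range(slova(n))` loop of brojanje, state (counter, sloj, i, j);
-- the fuel is the iteration count that range(slova(n)) contributes.
-- `max(lista)` never raises (lista has four elements), so the `.getD ""` is unreachable.
def brojanjeGo (matrica : List (List String)) (n : Int) :
    Nat → Int → Int → Int → Int → Int
  | 0, counter, _, _, _ => counter
  | fuel + 1, counter, sloj, i, j =>
    let lista := [cellD matrica i j, cellD matrica j (n-1-i),
                  cellD matrica (n-i-1) (n-j-1), cellD matrica (n-j-1) i]
    let najvece := (PySem.List.max? lista (fun y => y)).getD ""
    let counter2 := (List.range 4).foldl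
      (fun c t => c + (pyOrdD najvece - pyOrdD ((PySem.List.pyGet? lista (t : Int)).getD ""))) counter
    if j < n - sloj - 1 then
      brojanjeGo matrica n fuel counter2 sloj i (j+1)
    else
      brojanjeGo matrica n fuel counter2 (sloj+1) sloj sloj

def brojanje (matrica : List (List String)) (n : Int) : Int :=
  brojanjeGo matrica n (slova n).toNat 0 1 0 0

-- ===== PORT B =====
-- B: for i in range(n): for j in range(n): counter += max(four orbit ords) - ord(matrica[i][j])
def brojanje_alt (matrica : List (List String)) (n : Int) : Int :=
  (PySem.List.pyRange 0 n 1).foldl (fun counter i =>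
    (PySem.List.pyRange 0 n 1).foldl (fun counter j =>
      let here := pyOrdD (cellD matrica i j)
      let best := max (max (max here (pyOrdD (cellD matrica j (n-1-i))))
                       (pyOrdD (cellD matrica (n-1-i) (n-1-j))))
                      (pyOrdD (cellD matrica (n-1-j) i))
      counter + (best - here)) counter) 0

-- ===== PRECONDITION & SPEC =====
-- Pre_ requires (for n > 0) the whole n×n block to exist and consist of single-character
-- strings.  A raises IndexError/TypeError on every violation EXCEPT a malformed entry it
-- never reads (the centre cell for odd n, or the single cell for n = 1): there A returns 0
-- extra but B (which reads every cell) raises TypeError, so those inputs are excluded.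
def Pre_brojanje (matrica : List (List String)) (n : Int) : Prop :=
  n ≤ 0 ∨ (n.toNat ≤ matrica.length ∧
    ∀ row ∈ matrica.take n.toNat, n.toNat ≤ row.length ∧
      ∀ s ∈ row.take n.toNat, s.toList.length = 1)
instance (matrica : List (List String)) (n : Int) : Decidable (Pre_brojanje matrica n) := by
  unfold Pre_brojanje; infer_instance

def pvWitness_brojanje : List (List String) × Int := ([["b", "a"], ["a", "a"]], 2)

def Spec_brojanje (matrica : List (List String)) (n : Int) (out : Int) : Prop := out = brojanje_alt matrica n
instance (matrica : List (List String)) (n : Int) (out : Int) : Decidable (Spec_brojanje matrica n out) := by unfold Spec_brojanje; infer_instance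

-- ===== CLAIM (what is proved, stated in full; the proofs are below) =====
def Claim_equal_brojanje : Prop := ∀ (matrica : List (List String)) (n : Int), Dom_brojanje matrica n → Pre_brojanje matrica n → Spec_brojanje matrica n (brojanje matrica n)

-- ===== LEMMAS AND PROOFS =====

-- cell value and orbit quantities in Nat coordinates (proof-side only)
def vv (m : List (List String)) (i j : Nat) : Int := pyOrdD (cellD m (i : Int) (j : Int))

def om (m : List (List String)) (N i j : Nat) : Int :=
  max (max (max (vv m i j) (vv m j (N-1-i))) (vv m (N-1-i) (N-1-j))) (vv m (N-1-j) i)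

def gg (m : List (List String)) (N i j : Nat) : Int := om m N i j - vv m i j

def f4 (m : List (List String)) (N k j : Nat) : Int :=
  4 * om m N k j - (vv m k j + vv m j (N-1-k) + vv m (N-1-k) (N-1-j) + vv m (N-1-j) k)

def rowSum (m : List (List String)) (N k : Nat) : Int :=
  ∑ j ∈ Finset.Ico k (N-1-k), f4 m N k j

def ringsSum (m : List (List String)) (N k : Nat) : Int :=
  if 2*k+1 < N then rowSum m N k + ringsSum m N (k+1) else 0
termination_by N - k
decreasing_by omega

-- the rotation orbit of a cell, and the inverse "find the wedge representative" map
def rotF (N : Nat) (q : (Nat × Nat) × Nat) : Nat × Nat :=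
  match q.2 with
  | 0 => q.1
  | 1 => (q.1.2, N-1-q.1.1)
  | 2 => (N-1-q.1.1, N-1-q.1.2)
  | _ => (N-1-q.1.2, q.1.1)

def rotD (N : Nat) (c : Nat × Nat) : (Nat × Nat) × Nat :=
  if c.1 ≤ c.2 ∧ c.2 + c.1 + 2 ≤ N then (c, 0)
  else if (N-1-c.2) ≤ c.1 ∧ c.1 + (N-1-c.2) + 2 ≤ N then ((N-1-c.2, c.1), 1)
  else if (N-1-c.1) ≤ (N-1-c.2) ∧ (N-1-c.2) + (N-1-c.1) + 2 ≤ N then ((N-1-c.1, N-1-c.2), 2)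
  else ((c.2, N-1-c.1), 3)

-- abbreviation for the shape facts Pre_ gives for the n×n block
def PreBlock (m : List (List String)) (N : Nat) : Prop :=
  N ≤ m.length ∧ ∀ row ∈ m.take N, N ≤ row.length ∧ ∀ s ∈ row.take N, s.toList.length = 1

theorem singleton_lt (c c' : Char) : ([c] < [c']) ↔ c < c' := by
  constructor
  · intro h; cases h with
    | cons h => exact absurd h (by simp)
    | rel h => exact h
  · intro h; exact List.Lex.rel h
theorem singleton_le (c c' : Char) :
    (String.ofList [c] ≤ String.ofList [c']) ↔ c ≤ c' := by
  rw [String.le_iff_toList_le]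
  simp [le_iff_lt_or_eq, singleton_lt]
theorem char_le_toNat (c c' : Char) : c ≤ c' ↔ c.toNat ≤ c'.toNat := by
  simp [Char.le_def, UInt32.le_iff_toNat_le]
theorem ordD_max (a b : String) (ha : a.toList.length = 1) (hb : b.toList.length = 1) :
    pyOrdD (max a b) = max (pyOrdD a) (pyOrdD b) := by
  obtain ⟨c, hc⟩ := List.length_eq_one_iff.mp ha
  obtain ⟨c', hc'⟩ := List.length_eq_one_iff.mp hb
  have hA : a = String.ofList [c] := by rw [← hc]; simp
  have hB : b = String.ofList [c'] := by rw [← hc']; simp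
  subst hA; subst hB
  rw [max_def]
  split_ifs with hle
  · have h2 := (char_le_toNat c c').mp ((singleton_le c c').mp hle)
    simp [pyOrdD]; omega
  · have h2 : ¬ c.toNat ≤ c'.toNat :=
      fun h => hle ((singleton_le c c').mpr ((char_le_toNat c c').mpr h))
    simp [pyOrdD]; omega

theorem innerFold (counter M : Int) (a b c d : String) :
    (List.range 4).foldl
      (fun c' t => c' + (M - pyOrdD ((PySem.List.pyGet? [a,b,c,d] (t : Int)).getD ""))) counter
    = counter + ((M - pyOrdD a) + (M - pyOrdD b) + (M - pyOrdD c) + (M - pyOrdD d)) := by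
  have h4 : List.range 4 = [0,1,2,3] := rfl
  rw [h4]
  simp [List.foldl, PySem.List.pyGet?, PySem.List.pyIdx?]
  ring

theorem preCell (m : List (List String)) (N : Nat) (hP : PreBlock m N)
    (i j : Nat) (hi : i < N) (hj : j < N) :
    (cellD m (i : Int) (j : Int)).toList.length = 1 := by
  obtain ⟨hlen, hrows⟩ := hP
  have him : i < m.length := lt_of_lt_of_le hi hlen
  have hrow : m[i] ∈ m.take N := by
    have : (m.take N)[i]'(by simp; omega) = m[i] := List.getElem_take
    rw [← this]; exact List.getElem_mem _
  obtain ⟨hrlen, hcells⟩ := hrows _ hrow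
  have hjm : j < m[i].length := lt_of_lt_of_le hj hrlen
  have hcell : m[i][j] ∈ m[i].take N := by
    have : (m[i].take N)[j]'(by simp; omega) = m[i][j] := List.getElem_take
    rw [← this]; exact List.getElem_mem _
  have := hcells _ hcell
  have hc : cellD m (i : Int) (j : Int) = m[i][j] := by
    simp [cellD, him, hjm]
  rw [hc]; exact this
theorem brojanjeGo_step (m : List (List String)) (N : Nat) (hP : PreBlock m N)
    (fuel : Nat) (counter : Int) (k j : Nat) (_hk : k ≤ j) (hj : j + k + 2 ≤ N) :
    brojanjeGo m (N : Int) (fuel+1) counter ((k : Int)+1) (k : Int) (j : Int) =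
      (if (j : Int) < (N : Int) - ((k : Int)+1) - 1 then
        brojanjeGo m (N : Int) fuel (counter + f4 m N k j) ((k : Int)+1) (k : Int) ((j : Int)+1)
      else
        brojanjeGo m (N : Int) fuel (counter + f4 m N k j) (((k : Int)+1)+1) ((k : Int)+1) ((k : Int)+1)) := by
  have e1 : (N : Int) - 1 - (k : Int) = ((N-1-k : Nat) : Int) := by omega
  have e1' : (N : Int) - (k : Int) - 1 = ((N-1-k : Nat) : Int) := by omega
  have e2 : (N : Int) - 1 - (j : Int) = ((N-1-j : Nat) : Int) := by omega
  have e2' : (N : Int) - (j : Int) - 1 = ((N-1-j : Nat) : Int) := by omega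
  have hsk : ∀ i' j' : Nat, i' < N → j' < N → (cellD m (i' : Int) (j' : Int)).toList.length = 1 :=
    fun i' j' h1 h2 => preCell m N hP i' j' h1 h2
  have hkN : k < N := by omega
  have hjN : j < N := by omega
  have hk1 : N-1-k < N := by omega
  have hj1 : N-1-j < N := by omega
  rw [brojanjeGo]
  simp only [e1, e1', e2']
  rw [PySem.List.max?_id_cons]
  have hfold : List.foldl max (cellD m (k : Int) (j : Int))
      [cellD m (j : Int) ((N-1-k : Nat) : Int), cellD m ((N-1-k : Nat) : Int) ((N-1-j : Nat) : Int),
       cellD m ((N-1-j : Nat) : Int) (k : Int)] =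
      max (max (max (cellD m (k : Int) (j : Int)) (cellD m (j : Int) ((N-1-k : Nat) : Int)))
        (cellD m ((N-1-k : Nat) : Int) ((N-1-j : Nat) : Int))) (cellD m ((N-1-j : Nat) : Int) (k : Int)) := by
    simp [List.foldl]
  simp only [Option.getD_some, hfold]
  rw [innerFold]
  have lmax : ∀ a b : String, a.toList.length = 1 → b.toList.length = 1 → (max a b).toList.length = 1 := by
    intro a b ha hb
    rcases max_choice a b with h | h <;> rw [h] <;> assumption
  have l0 := hsk k j hkN hjN
  have l1 := hsk j (N-1-k) hjN hk1
  have l2 := hsk (N-1-k) (N-1-j) hk1 hj1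
  have l3 := hsk (N-1-j) k hj1 hkN
  have l01 := lmax _ _ l0 l1
  have l012 := lmax _ _ l01 l2
  have hM : pyOrdD (max (max (max (cellD m (k : Int) (j : Int)) (cellD m (j : Int) ((N-1-k : Nat) : Int)))
        (cellD m ((N-1-k : Nat) : Int) ((N-1-j : Nat) : Int))) (cellD m ((N-1-j : Nat) : Int) (k : Int)))
      = om m N k j := by
    unfold om vv
    rw [ordD_max _ _ l012 l3, ordD_max _ _ l01 l2, ordD_max _ _ l0 l1]
  rw [hM]
  have hcnt : counter + ((om m N k j - vv m k j) + (om m N k j - vv m j (N-1-k))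
      + (om m N k j - vv m (N-1-k) (N-1-j)) + (om m N k j - vv m (N-1-j) k))
      = counter + f4 m N k j := by
    unfold f4; ring
  unfold vv at hcnt
  rw [hcnt]
theorem walkRow (m : List (List String)) (N : Nat) (hP : PreBlock m N) :
    ∀ (t j : Nat) (counter : Int) (rest : Nat) (k : Nat), k ≤ j → j + t + k + 2 = N →
    brojanjeGo m (N : Int) (t + 1 + rest) counter ((k : Int)+1) (k : Int) (j : Int) =
      brojanjeGo m (N : Int) rest (counter + ∑ j' ∈ Finset.Icc j (j+t), f4 m N k j')
        (((k : Int)+1)+1) ((k : Int)+1) ((k : Int)+1) := by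
  intro t
  induction t with
  | zero =>
    intro j counter rest k hk hN
    have h1 : (0:Nat) + 1 + rest = rest + 1 := by omega
    rw [h1, brojanjeGo_step m N hP rest counter k j hk (by omega)]
    rw [if_neg (by omega)]
    have : ∑ j' ∈ Finset.Icc j (j+0), f4 m N k j' = f4 m N k j := by simp
    rw [this]
  | succ t ih =>
    intro j counter rest k hk hN
    have h1 : (t + 1) + 1 + rest = (t + 1 + rest) + 1 := by omega
    rw [h1, brojanjeGo_step m N hP (t + 1 + rest) counter k j hk (by omega)]
    rw [if_pos (by omega)]
    have hjc : ((j : Int) + 1) = ((j + 1 : Nat) : Int) := by omega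
    rw [hjc, ih (j+1) (counter + f4 m N k j) rest k (by omega) (by omega)]
    have hsum : counter + f4 m N k j + ∑ j' ∈ Finset.Icc (j+1) (j+1+t), f4 m N k j'
        = counter + ∑ j' ∈ Finset.Icc j (j+(t+1)), f4 m N k j' := by
      have hI : Finset.Icc j (j+(t+1)) = insert j (Finset.Icc (j+1) (j+1+t)) := by
        ext x; simp; omega
      rw [hI, Finset.sum_insert (by simp)]
      ring
    rw [hsum]

theorem slovaGo_acc (k : Nat) : ∀ (n m u : Int), (n - m).toNat = k →
    slovaGo n m u = u + slovaGo n m 0 := by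
  induction k using Nat.strong_induction_on with
  | _ k ih =>
    intro n m u hk
    by_cases h : n - m > 0
    · conv_lhs => rw [slovaGo]
      conv_rhs => rw [slovaGo]
      rw [if_pos h, if_pos h]
      rw [ih (n - (m+2)).toNat (by omega) n (m+2) (u + (n-m)) rfl,
          ih (n - (m+2)).toNat (by omega) n (m+2) (0 + (n-m)) rfl]
      ring
    · conv_lhs => rw [slovaGo]
      conv_rhs => rw [slovaGo]
      rw [if_neg h, if_neg h]; ring
theorem slovaGo_nonneg (k : Nat) : ∀ (n m : Int), (n - m).toNat = k → 0 ≤ slovaGo n m 0 := by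
  induction k using Nat.strong_induction_on with
  | _ k ih =>
    intro n m hk
    by_cases h : n - m > 0
    · rw [slovaGo, if_pos h, slovaGo_acc (n - (m+2)).toNat n (m+2) _ rfl]
      have := ih (n - (m+2)).toNat (by omega) n (m+2) rfl
      omega
    · rw [slovaGo, if_neg h]

theorem slovaGo_zero' (n m u : Int) (h : ¬ n - m > 0) : slovaGo n m u = u := by
  rw [slovaGo]; rw [if_neg h]

theorem slovaGo_pos' (n m : Int) (h : n - m > 0) :
    slovaGo n m 0 = (n - m) + slovaGo n (m + 2) 0 := by
  conv_lhs => rw [slovaGo]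
  rw [if_pos h, slovaGo_acc (n - (m+2)).toNat n (m+2) (0 + (n - m)) rfl]
  ring

theorem walkAll (m : List (List String)) (N : Nat) (hP : PreBlock m N) :
    ∀ (d k : Nat) (counter : Int), N - k ≤ d →
    brojanjeGo m (N : Int) (slovaGo (N : Int) (2*(k : Int)+1) 0).toNat counter
        ((k : Int)+1) (k : Int) (k : Int) = counter + ringsSum m N k := by
  intro d
  induction d with
  | zero =>
    intro k counter hd
    have hnk : ¬ 2*k+1 < N := by omega
    rw [slovaGo_zero' _ _ _ (by omega)]
    rw [ringsSum, if_neg hnk]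
    simp [brojanjeGo]
  | succ d ih =>
    intro k counter hd
    by_cases h : 2*k+1 < N
    · have hpos : (N : Int) - (2*(k : Int)+1) > 0 := by omega
      rw [slovaGo_pos' _ _ hpos]
      have hnn : 0 ≤ slovaGo (N : Int) (2*(k : Int)+1+2) 0 :=
        slovaGo_nonneg _ _ _ rfl
      have hsplit : ((N : Int) - (2*(k : Int)+1) + slovaGo (N : Int) (2*(k : Int)+1+2) 0).toNat
          = ((N - (2*k+2)) + 1) + (slovaGo (N : Int) (2*(k : Int)+1+2) 0).toNat := by
        omega
      rw [hsplit]
      have hrow := walkRow m N hP (N - (2*k+2)) k counter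
        ((slovaGo (N : Int) (2*(k : Int)+1+2) 0).toNat) k (le_refl k) (by omega)
      rw [hrow]
      have hc1 : ((k : Int)+1) = ((k+1 : Nat) : Int) := by omega
      have hc2 : (2*(k : Int)+1+2) = (2*((k+1 : Nat) : Int)+1) := by push_cast; ring
      rw [hc1, hc2, ih (k+1) _ (by omega)]
      have hrs : ringsSum m N k = rowSum m N k + ringsSum m N (k+1) := by
        rw [ringsSum, if_pos h]
      rw [hrs]
      have hIcc : Finset.Icc k (k + (N - (2*k+2))) = Finset.Ico k (N-1-k) := by
        ext x; simp; omega
      rw [show rowSum m N k = ∑ j' ∈ Finset.Icc k (k + (N - (2*k+2))), f4 m N k j' from by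
        rw [rowSum, ← hIcc]]
      ring
    · rw [slovaGo_zero' _ _ _ (by omega)]
      rw [ringsSum, if_neg h]
      simp [brojanjeGo]

theorem A_eq (m : List (List String)) (N : Nat) (hP : PreBlock m N) :
    brojanje m (N : Int) = ringsSum m N 0 := by
  unfold brojanje slova
  have h := walkAll m N hP N 0 0 (by omega)
  simp only [Nat.cast_zero, zero_add, mul_zero] at h ⊢
  rw [show (1 : Int) = 2*(0:Int)+1 from by ring] at h ⊢
  simpa using h

theorem ringsSum_eq (m : List (List String)) (N : Nat) :
    ∀ (d k : Nat), N - k ≤ d → ringsSum m N k = ∑ k' ∈ Finset.Ico k N, rowSum m N k' := by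
  intro d
  induction d with
  | zero =>
    intro k hd
    rw [ringsSum, if_neg (by omega)]
    rw [show Finset.Ico k N = ∅ from by ext x; simp; omega]
    simp
  | succ d ih =>
    intro k hd
    by_cases h : k < N
    · rw [ringsSum]
      rw [show Finset.Ico k N = insert k (Finset.Ico (k+1) N) from by ext x; simp; omega,
          Finset.sum_insert (by simp)]
      rw [← ih (k+1) (by omega)]
      by_cases h2 : 2*k+1 < N
      · rw [if_pos h2]
      · rw [if_neg h2]
        have hrow0 : rowSum m N k = 0 := by
          rw [rowSum, show Finset.Ico k (N-1-k) = ∅ from by ext x; simp; omega]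
          simp
        have hrs0 : ringsSum m N (k+1) = 0 := by
          rw [ringsSum, if_neg (by omega)]
        rw [hrow0, hrs0]; ring
    · rw [ringsSum, if_neg (by omega)]
      rw [show Finset.Ico k N = ∅ from by ext x; simp; omega]
      simp
theorem max_rot4 (a b c d : Int) : max (max (max b c) d) a = max (max (max a b) c) d := by
  apply le_antisymm <;> simp <;> omega

theorem om_rot (m : List (List String)) (N p1 p2 : Nat) (h1 : p1 < N) (_h2 : p2 < N) :
    om m N p2 (N-1-p1) = om m N p1 p2 := by
  unfold om
  rw [show N-1-(N-1-p1) = p1 from by omega]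
  exact max_rot4 _ _ _ _

theorem gg_center (m : List (List String)) (N i : Nat) (h : 2*i+1 = N) :
    gg m N i i = 0 := by
  unfold gg om
  rw [show N-1-i = i from by omega]
  simp

theorem f4_orbit (m : List (List String)) (N : Nat) (p : Nat × Nat)
    (h1 : p.1 < N) (h2 : p.2 < N) :
    f4 m N p.1 p.2 = ∑ t ∈ Finset.range 4, gg m N (rotF N (p, t)).1 (rotF N (p, t)).2 := by
  have hN1 : ∀ a : Nat, a < N → N-1-a < N := by intro a ha; omega
  rw [show (4:Nat) = 3+1 from rfl, Finset.sum_range_succ, Finset.sum_range_succ,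
      Finset.sum_range_succ, Finset.sum_range_one]
  unfold rotF gg
  simp only
  rw [om_rot m N p.1 p.2 h1 h2]
  have e2 : om m N (N-1-p.1) (N-1-p.2) = om m N p.1 p.2 := by
    rw [← om_rot m N p.1 p.2 h1 h2]
    rw [show N-1-p.2 = N-1-p.2 from rfl]
    have := om_rot m N p.2 (N-1-p.1) h2 (hN1 _ h1)
    rw [show N-1-p.2 = N-1-p.2 from rfl] at this
    rw [← this]
  have e3 : om m N (N-1-p.2) p.1 = om m N p.1 p.2 := by
    have := om_rot m N (N-1-p.1) (N-1-p.2) (hN1 _ h1) (hN1 _ h2)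
    rw [show N-1-(N-1-p.1) = p.1 from by omega] at this
    rw [← e2, ← this]
  rw [e2, e3]
  unfold f4
  ring
set_option maxHeartbeats 1000000 in
theorem wedge_eq_grid (m : List (List String)) (N : Nat) :
    ∑ k ∈ Finset.range N, rowSum m N k
      = ∑ i ∈ Finset.range N, ∑ j ∈ Finset.range N, gg m N i j := by
  classical
  set Wf : Finset (Nat × Nat) :=
    (Finset.range N ×ˢ Finset.range N).filter (fun p => p.1 ≤ p.2 ∧ p.2 + p.1 + 2 ≤ N) with hWf
  set Gnc : Finset (Nat × Nat) :=
    (Finset.range N ×ˢ Finset.range N).filter (fun c => ¬(2*c.1+1 = N ∧ 2*c.2+1 = N)) with hGnc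
  -- wedge rows = sum over Wf
  have step1 : ∑ k ∈ Finset.range N, rowSum m N k = ∑ p ∈ Wf, f4 m N p.1 p.2 := by
    rw [hWf, Finset.sum_filter, Finset.sum_product]
    apply Finset.sum_congr rfl
    intro k hk
    rw [rowSum]
    rw [show Finset.Ico k (N-1-k)
        = (Finset.range N).filter (fun j => k ≤ j ∧ j + k + 2 ≤ N) from by ext x; simp; omega]
    rw [Finset.sum_filter]
  rw [step1]
  -- orbit expansion
  have step2 : ∑ p ∈ Wf, f4 m N p.1 p.2
      = ∑ q ∈ Wf ×ˢ Finset.range 4, gg m N (rotF N q).1 (rotF N q).2 := by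
    rw [Finset.sum_product]
    apply Finset.sum_congr rfl
    intro p hp
    rw [hWf, Finset.mem_filter, Finset.mem_product, Finset.mem_range, Finset.mem_range] at hp
    exact f4_orbit m N p hp.1.1 hp.1.2
  rw [step2]
  -- the bijection
  have step3 : ∑ q ∈ Wf ×ˢ Finset.range 4, gg m N (rotF N q).1 (rotF N q).2
      = ∑ c ∈ Gnc, gg m N c.1 c.2 := by
    apply Finset.sum_nbij' (rotF N) (rotD N)
    · intro q hq
      rw [Finset.mem_product, hWf, Finset.mem_filter, Finset.mem_product] at hq
      simp only [Finset.mem_range] at hq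
      obtain ⟨⟨⟨hp1, hp2⟩, hw1, hw2⟩, ht⟩ := hq
      rw [hGnc, Finset.mem_filter, Finset.mem_product]
      rcases q with ⟨⟨a, b⟩, t⟩
      dsimp only at hp1 hp2 hw1 hw2 ht ⊢
      interval_cases t <;> simp [rotF, Finset.mem_range] <;> omega
    · intro c hc
      rw [hGnc, Finset.mem_filter, Finset.mem_product] at hc
      simp only [Finset.mem_range] at hc
      obtain ⟨⟨hc1, hc2⟩, hnc⟩ := hc
      rw [Finset.mem_product, hWf, Finset.mem_filter, Finset.mem_product]
      simp only [Finset.mem_range]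
      rcases c with ⟨a, b⟩
      dsimp only at hc1 hc2 hnc ⊢
      unfold rotD
      dsimp only [Prod.fst, Prod.snd]
      split_ifs with w0 w1 w2 <;> dsimp only [Prod.fst, Prod.snd] <;> first | trivial | omega
    · intro q hq
      rw [Finset.mem_product, hWf, Finset.mem_filter, Finset.mem_product] at hq
      simp only [Finset.mem_range] at hq
      obtain ⟨⟨⟨hp1, hp2⟩, hw1, hw2⟩, ht⟩ := hq
      rcases q with ⟨⟨a, b⟩, t⟩
      dsimp only at hp1 hp2 hw1 hw2 ht
      interval_cases t <;>
        · dsimp only [rotF, rotD, Prod.fst, Prod.snd]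
          split_ifs <;>
            first
              | (exfalso; omega)
              | rfl
              | (simp only [Prod.mk.injEq]; refine ⟨⟨?_, ?_⟩, trivial⟩ <;> first | trivial | omega)
    · intro c hc
      rw [hGnc, Finset.mem_filter, Finset.mem_product] at hc
      simp only [Finset.mem_range] at hc
      obtain ⟨⟨hc1, hc2⟩, hnc⟩ := hc
      rcases c with ⟨a, b⟩
      dsimp only at hc1 hc2 hnc
      unfold rotD
      dsimp only [Prod.fst, Prod.snd]
      split_ifs with w0 w1 w2 <;> dsimp only [rotF, Prod.fst, Prod.snd] <;>
        first
          | rfl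
          | (simp only [Prod.mk.injEq]; refine ⟨?_, ?_⟩ <;> first | trivial | omega)
    · intro q hq; rfl
  rw [step3]
  -- add the centre back
  have step4 : ∑ i ∈ Finset.range N, ∑ j ∈ Finset.range N, gg m N i j
      = ∑ c ∈ Finset.range N ×ˢ Finset.range N, gg m N c.1 c.2 := by
    rw [Finset.sum_product]
  rw [step4, ← Finset.sum_filter_add_sum_filter_not (Finset.range N ×ˢ Finset.range N)
      (fun c => ¬(2*c.1+1 = N ∧ 2*c.2+1 = N))]
  have step5 : ∑ c ∈ (Finset.range N ×ˢ Finset.range N).filter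
      (fun c => ¬¬(2*c.1+1 = N ∧ 2*c.2+1 = N)), gg m N c.1 c.2 = 0 := by
    apply Finset.sum_eq_zero
    intro c hc
    rw [Finset.mem_filter] at hc
    have h := not_not.mp hc.2
    have hab : c.1 = c.2 := by omega
    rw [hab]
    exact gg_center m N c.2 (by omega)
  rw [step5, ← hGnc]
  ring
theorem sum_map_range (N : Nat) (f : Nat → Int) :
    ((List.range N).map f).sum = ∑ i ∈ Finset.range N, f i := by
  induction N with
  | zero => simp
  | succ N ih => rw [List.range_succ, Finset.sum_range_succ, List.map_append, List.sum_append, ih]; simp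

theorem B_eq (m : List (List String)) (N : Nat) :
    brojanje_alt m (N : Int) = ∑ i ∈ Finset.range N, ∑ j ∈ Finset.range N, gg m N i j := by
  unfold brojanje_alt
  rw [PySem.List.pyRange_zero]
  have hN : ((N : Int)).toNat = N := by omega
  rw [hN]
  rw [PySem.List.foldl_congr_mem _ _
    (fun counter i => counter + ∑ j ∈ Finset.range N, gg m N i.toNat j) 0 ?_]
  · rw [PySem.List.foldl_add, List.map_map]
    rw [show ((fun i : Int => ∑ j ∈ Finset.range N, gg m N i.toNat j) ∘ fun k : Nat => (k : Int))
        = fun k : Nat => ∑ j ∈ Finset.range N, gg m N k j from by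
      funext k; simp]
    rw [sum_map_range]
    simp
  · intro acc x hx
    obtain ⟨iN, hiN, rfl⟩ := List.mem_map.mp hx
    rw [List.mem_range] at hiN
    simp only [Int.toNat_natCast]
    rw [PySem.List.foldl_congr_mem _ _
      (fun counter j => counter + gg m N iN j.toNat) acc ?_]
    · rw [PySem.List.foldl_add, List.map_map]
      congr 1
    · intro acc2 x2 hx2
      obtain ⟨jN, hjN, rfl⟩ := List.mem_map.mp hx2
      rw [List.mem_range] at hjN
      simp only [Int.toNat_natCast]
      have e1 : (N : Int) - 1 - (iN : Int) = ((N-1-iN : Nat) : Int) := by omega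
      have e2 : (N : Int) - 1 - ((jN : Nat) : Int) = ((N-1-jN : Nat) : Int) := by omega
      rw [e1, e2]
      unfold gg om vv
      ring

-- ===== VERDICT (by name: the statement is the Claim_ definition above) =====
theorem brojanje_spec : Claim_equal_brojanje := by
  intro m n hDom hPre
  unfold Spec_brojanje
  by_cases hn : n ≤ 0
  · have hA : brojanje m n = 0 := by
      unfold brojanje slova
      rw [slovaGo_zero' n 1 0 (by omega)]
      simp [brojanjeGo]
    have hB : brojanje_alt m n = 0 := by
      unfold brojanje_alt
      have : PySem.List.pyRange 0 n 1 = [] := by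
        simp [PySem.List.pyRange]; omega
      rw [this]; simp
    rw [hA, hB]
  · have hN : n = ((n.toNat : Nat) : Int) := by omega
    rcases hPre with h | hP
    · omega
    · rw [hN, A_eq m n.toNat hP, ringsSum_eq m n.toNat n.toNat 0 (by omega)]
      have : Finset.Ico 0 n.toNat = Finset.range n.toNat := by
        ext x; simp
      rw [this, wedge_eq_grid, ← B_eq]
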